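-- pv_equiv track=rewrite | github.com/federicozorzi/number_challenge | useful_function_number_challenge.py | find_possible_spots
-- ===== SOURCE A (Python) =====
-- def find_possible_spots(v, r:int):
--     pos_start = 0
--     pos_stop = len(v) - 1
--
--     # check if r is in v
--     if r in v:
--         return -2, -2
--
--     # i go through all the positions in v to find if each specific position can be pos_start or pos_stop
--     for j in range(len(v)):
--         if v[j] < r:
--             pos_start = j+1
--         if v[- 1 - j] > r:
--             pos_stop = len(v) -1 - j -1
--
--     return pos_start, pos_stop
-- ===== SOURCE B (Python) =====
-- def find_possible_spots(v, r: int):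
--     # one pass: track last index with value < r and first index with value > r
--     last_lt = -1
--     first_gt = -1
--     for i, x in enumerate(v):
--         if x == r:
--             return -2, -2
--         if x < r:
--             last_lt = i
--         elif first_gt == -1:
--             first_gt = i
--     return last_lt + 1, (first_gt - 1) if first_gt != -1 else len(v) - 1
-- ===== Notes on version B (the rewrite author's own statement) =====
-- stated objective: alternative
-- what changed: A does a membership scan and then an index loop over range(len(v)) reading both v[j] and v[-1-j] with last-write-wins updates; B is a single forward pass over the elements that tracks the last index with value < r and the first index with value > r, returning early when it meets r.
import Mathlib
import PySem

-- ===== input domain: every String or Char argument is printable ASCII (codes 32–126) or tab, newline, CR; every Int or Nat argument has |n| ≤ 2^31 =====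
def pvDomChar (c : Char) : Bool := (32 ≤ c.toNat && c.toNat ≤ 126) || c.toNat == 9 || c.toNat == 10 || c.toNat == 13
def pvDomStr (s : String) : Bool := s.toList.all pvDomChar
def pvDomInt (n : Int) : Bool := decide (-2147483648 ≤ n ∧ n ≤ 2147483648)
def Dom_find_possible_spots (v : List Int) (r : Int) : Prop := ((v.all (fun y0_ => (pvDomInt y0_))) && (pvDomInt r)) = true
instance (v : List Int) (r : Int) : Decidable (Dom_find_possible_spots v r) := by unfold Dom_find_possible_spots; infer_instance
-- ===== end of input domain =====

-- B replaces A's membership scan plus index loop (reading v[j] and v[-1-j]) by one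
-- forward pass tracking the last index with value < r and the first index with value > r.

-- ===== PORT A =====
def find_possible_spots (v : List Int) (r : Int) : List Int :=
  let pos_start : Int := 0
  let pos_stop : Int := (v.length : Int) - 1
  if r ∈ v then [-2, -2]
  else
    let st := (PySem.List.pyRange 0 (v.length : Int) 1).foldl (fun (s : Int × Int) j =>
      (if PySem.List.pyGetD v j 0 < r then j + 1 else s.1,
       if r < PySem.List.pyGetD v (-1 - j) 0 then (v.length : Int) - 1 - j - 1 else s.2))
      (pos_start, pos_stop)
    [st.1, st.2]

-- ===== PORT B =====
-- the loop of Source B: i = current index, last_lt / first_gt as in Source B (-1 = not found)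
def fpsGo (r n : Int) : List Int → Int → Int → Int → List Int
  | [], _, last_lt, first_gt =>
      [last_lt + 1, if first_gt ≠ -1 then first_gt - 1 else n - 1]
  | x :: xs, i, last_lt, first_gt =>
      if x = r then [-2, -2]
      else if x < r then fpsGo r n xs (i + 1) i first_gt
      else if first_gt = -1 then fpsGo r n xs (i + 1) last_lt i
      else fpsGo r n xs (i + 1) last_lt first_gt

def find_possible_spots_alt (v : List Int) (r : Int) : List Int :=
  fpsGo r (v.length : Int) v 0 (-1) (-1)

-- ===== PRECONDITION & SPEC =====
def Spec_find_possible_spots (v : List Int) (r : Int) (out : List Int) : Prop := out = find_possible_spots_alt v r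
instance (v : List Int) (r : Int) (out : List Int) : Decidable (Spec_find_possible_spots v r out) := by unfold Spec_find_possible_spots; infer_instance

-- ===== CLAIM (what is proved, stated in full; the proofs are below) =====
def Claim_equal_find_possible_spots : Prop := ∀ (v : List Int) (r : Int), Dom_find_possible_spots v r → Spec_find_possible_spots v r (find_possible_spots v r)

-- ===== LEMMAS AND PROOFS =====

-- closed characterisations used by both sides:
-- specStart r v = 1 + last index with v[j] < r (0 if none)
def specStart (r : Int) : List Int → Int
  | [] => 0
  | x :: xs => let s := specStart r xs; if 0 < s then s + 1 else if x < r then 1 else 0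

-- specStop r v = -1 + first index with v[j] > r (length-1 if none)
def specStop (r : Int) : List Int → Int
  | [] => -1
  | x :: xs => if r < x then -1 else specStop r xs + 1

theorem specStart_nonneg (r : Int) (v : List Int) : 0 ≤ specStart r v := by
  induction v with
  | nil => simp [specStart]
  | cons x xs ih => simp only [specStart]; split_ifs <;> omega

theorem specStart_append (r x : Int) (ys : List Int) :
    specStart r (ys ++ [x]) = if x < r then (ys.length : Int) + 1 else specStart r ys := by
  induction ys with
  | nil => simp [specStart]
  | cons y ys ih =>
    have h := specStart_nonneg r ys
    simp only [List.cons_append, specStart, ih, List.length_cons]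
    split_ifs <;> first | rfl | omega

-- value-shift through a "set-or-keep" fold
theorem foldl_setkeep_shift (l : List Int) (c : Int → Prop) [DecidablePred c]
    (w : Int → Int) (a : Int) :
    l.foldl (fun s j => if c j then w j + 1 else s) (a + 1)
      = l.foldl (fun s j => if c j then w j else s) a + 1 := by
  induction l generalizing a with
  | nil => rfl
  | cons j l ih =>
    simp only [List.foldl_cons]
    by_cases h : c j
    · simp only [if_pos h]; exact ih (w j)
    · simp only [if_neg h]; exact ih a

theorem foldA_start (r : Int) (v : List Int) :
    (PySem.List.pyRange 0 (v.length : Int) 1).foldl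
        (fun (s : Int) j => if PySem.List.pyGetD v j 0 < r then j + 1 else s) 0
      = specStart r v := by
  induction v using List.reverseRecOn with
  | nil =>
    have h0 : PySem.List.pyRange 0 ((([] : List Int)).length : Int) 1 = [] := by
      simp [PySem.List.pyRange_one_eq_nil]
    rw [h0]; rfl
  | append_singleton ys x ih =>
    rw [specStart_append]
    have hlen : ((ys ++ [x]).length : Int) = (ys.length : Int) + 1 := by simp
    rw [hlen, PySem.List.pyRange_one_succ_right (by omega), List.foldl_append]
    have hcong : (PySem.List.pyRange 0 (ys.length : Int) 1).foldl
        (fun (s : Int) j => if PySem.List.pyGetD (ys ++ [x]) j 0 < r then j + 1 else s) 0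
        = (PySem.List.pyRange 0 (ys.length : Int) 1).foldl
        (fun (s : Int) j => if PySem.List.pyGetD ys j 0 < r then j + 1 else s) 0 := by
      apply PySem.List.foldl_congr_mem
      intro s j hj
      have hj' := (PySem.List.mem_pyRange_one).1 hj
      have hget : PySem.List.pyGetD (ys ++ [x]) j 0 = PySem.List.pyGetD ys j 0 := by
        rw [PySem.List.pyGetD_eq_getElem (ys ++ [x]) 0 (by omega) (by simp; omega),
            PySem.List.pyGetD_eq_getElem ys 0 (by omega) (by omega)]
        rw [List.getElem_append_left (by omega)]
      rw [hget]
    simp only [List.foldl_cons, List.foldl_nil, hcong, ih]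
    have hx : PySem.List.pyGetD (ys ++ [x]) (ys.length : Int) 0 = x := by
      rw [PySem.List.pyGetD_eq_getElem (ys ++ [x]) 0 (by omega) (by simp)]
      simp
    rw [hx]

theorem pyGetD_neg_cons (x : Int) (xs : List Int) (j : Int)
    (h0 : 0 ≤ j) (h1 : j < (xs.length : Int)) :
    PySem.List.pyGetD (x :: xs) (-1 - j) 0 = PySem.List.pyGetD xs (-1 - j) 0 := by
  have e1 : -1 - j = -(((j.toNat + 1 : Nat) : Int)) := by omega
  rw [e1, PySem.List.pyGetD_neg_natCast (x :: xs) (j.toNat + 1) 0 (by omega) (by simp; omega),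
      PySem.List.pyGetD_neg_natCast xs (j.toNat + 1) 0 (by omega) (by omega)]
  have e2 : (x :: xs).length - (j.toNat + 1) = (xs.length - (j.toNat + 1)) + 1 := by
    simp; omega
  simp only [e2, List.getElem_cons_succ]

theorem foldA_stop (r : Int) (v : List Int) :
    (PySem.List.pyRange 0 (v.length : Int) 1).foldl
        (fun (s : Int) j => if r < PySem.List.pyGetD v (-1 - j) 0
          then (v.length : Int) - 1 - j - 1 else s) ((v.length : Int) - 1)
      = specStop r v := by
  induction v with
  | nil =>
    have h0 : PySem.List.pyRange 0 ((([] : List Int)).length : Int) 1 = [] := by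
      simp [PySem.List.pyRange_one_eq_nil]
    rw [h0]; rfl
  | cons x xs ih =>
    have hlen : ((x :: xs).length : Int) = (xs.length : Int) + 1 := by simp
    rw [hlen, PySem.List.pyRange_one_succ_right (by omega), List.foldl_append]
    have hcong : ∀ (init : Int), (PySem.List.pyRange 0 (xs.length : Int) 1).foldl
        (fun (s : Int) j => if r < PySem.List.pyGetD (x :: xs) (-1 - j) 0
          then (xs.length : Int) + 1 - 1 - j - 1 else s) init
        = (PySem.List.pyRange 0 (xs.length : Int) 1).foldl
        (fun (s : Int) j => if r < PySem.List.pyGetD xs (-1 - j) 0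
          then ((xs.length : Int) - 1 - j - 1) + 1 else s) init := by
      intro init
      apply PySem.List.foldl_congr_mem
      intro s j hj
      have hj' := (PySem.List.mem_pyRange_one).1 hj
      rw [pyGetD_neg_cons x xs j (by omega) (by omega)]
      split_ifs with h
      · omega
      · rfl
    have e0 : (xs.length : Int) + 1 - 1 = ((xs.length : Int) - 1) + 1 := by omega
    rw [hcong, e0,
        foldl_setkeep_shift _ (fun j => r < PySem.List.pyGetD xs (-1 - j) 0)
          (fun j => (xs.length : Int) - 1 - j - 1) ((xs.length : Int) - 1), ih]
    simp only [List.foldl_cons, List.foldl_nil]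
    have hx : PySem.List.pyGetD (x :: xs) (-1 - (xs.length : Int)) 0 = x := by
      have e1 : -1 - (xs.length : Int) = -(((xs.length + 1 : Nat) : Int)) := by push_cast; omega
      rw [e1, PySem.List.pyGetD_neg_natCast (x :: xs) (xs.length + 1) 0 (by omega) (by simp)]
      simp
    rw [hx]
    simp only [specStop]
    split_ifs with h
    · omega
    · rfl

theorem fpsGo_mem (r n : Int) (xs : List Int) (hm : r ∈ xs) :
    ∀ (i a b : Int), fpsGo r n xs i a b = [-2, -2] := by
  induction xs with
  | nil => cases hm
  | cons x xs ih =>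
    intro i a b
    by_cases hx : x = r
    · simp [fpsGo, hx]
    · have hm' : r ∈ xs := by cases hm with
        | head => exact absurd rfl hx
        | tail _ h => exact h
      simp only [fpsGo, if_neg hx]
      split_ifs <;> exact ih hm' _ _ _

theorem fpsGo_notmem (r n : Int) (xs : List Int) (hm : r ∉ xs) :
    ∀ (i a b : Int), 0 ≤ i → i + (xs.length : Int) = n →
    fpsGo r n xs i a b =
      [if 0 < specStart r xs then i + specStart r xs else a + 1,
       if b = -1 then i + specStop r xs else b - 1] := by
  induction xs with
  | nil =>
    intro i a b _ hn
    simp only [List.length_nil] at hn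
    simp only [fpsGo, specStart, specStop, ne_eq, List.cons.injEq, and_true]
    first | (constructor <;> split_ifs <;> omega) | (split_ifs <;> omega)
  | cons x xs ih =>
    intro i a b hi hn
    have hx : x ≠ r := fun h => hm (h ▸ List.mem_cons_self)
    have hm' : r ∉ xs := fun h => hm (List.mem_cons_of_mem x h)
    have hs0 := specStart_nonneg r xs
    have hn' : (i + 1) + (xs.length : Int) = n := by simp at hn ⊢; omega
    simp only [fpsGo, if_neg hx]
    by_cases hlt : x < r
    · rw [if_pos hlt, ih hm' (i + 1) i b (by omega) hn']
      simp only [specStart, specStop, if_neg (by omega : ¬ r < x), List.cons.injEq, and_true]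
      first | (constructor <;> split_ifs <;> omega) | (split_ifs <;> omega)
    · rw [if_neg hlt]
      have hgt : r < x := by omega
      by_cases hb : b = -1
      · rw [if_pos hb, ih hm' (i + 1) a i (by omega) hn']
        simp only [specStart, specStop, if_neg hlt, if_pos hgt,
          if_neg (by omega : ¬ i = -1), List.cons.injEq, and_true]
        first | (constructor <;> split_ifs <;> omega) | (split_ifs <;> omega)
      · rw [if_neg hb, ih hm' (i + 1) a b (by omega) hn']
        simp only [specStart, specStop, if_neg hlt, if_pos hgt, if_neg hb,
          List.cons.injEq, and_true]
        first | (constructor <;> split_ifs <;> omega) | (split_ifs <;> omega)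

-- ===== VERDICT (by name: the statement is the Claim_ definition above) =====
theorem find_possible_spots_spec : Claim_equal_find_possible_spots := by
  intro v r _
  unfold Spec_find_possible_spots find_possible_spots find_possible_spots_alt
  by_cases hm : r ∈ v
  · rw [if_pos hm, fpsGo_mem r _ v hm]
  · rw [if_neg hm]
    rw [fpsGo_notmem r _ v hm 0 (-1) (-1) le_rfl (by omega)]
    simp only
    rw [PySem.List.foldl_prod_mk
      (f := fun (s : Int) j => if PySem.List.pyGetD v j 0 < r then j + 1 else s)
      (g := fun (s : Int) j => if r < PySem.List.pyGetD v (-1 - j) 0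
        then (v.length : Int) - 1 - j - 1 else s)]
    rw [foldA_start, foldA_stop]
    have hs0 := specStart_nonneg r v
    congr 1
    · split_ifs <;> omega
    · simp
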